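-- pv_equiv track=rewrite | github.com/iamclu1914/apulu-universe | projects/vawn/marketing_dispatch.py | resolve_slot_from_issues
-- ===== SOURCE A (Python) =====
-- def resolve_slot_from_issues(issues: list) -> str | None:
--     """
--     Find the most relevant routine_execution issue and return its normalized title.
--     Prefers in_progress over todo; among equals, takes the first returned.
--     """
--     routine_issues = [i for i in issues if i.get("originKind") == "routine_execution"]
--     if not routine_issues:
--         # Fall back to any issue if no routine ones found
--         routine_issues = issues
--
--     if not routine_issues:
--         return None
--
--     # Prefer in_progress
--     in_progress = [i for i in routine_issues if i.get("status") == "in_progress"]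
--     candidates = in_progress if in_progress else routine_issues
--
--     title = candidates[0].get("title", "")
--     return title.strip().lower()
-- ===== SOURCE B (Python) =====
-- def resolve_slot_from_issues(issues: list) -> str | None:
--     """Single pass: track first routine / first routine in_progress / first any / first any in_progress."""
--     first_routine = None
--     first_routine_ip = None
--     first_any = None
--     first_any_ip = None
--     for issue in issues:
--         if first_any is None:
--             first_any = issue
--         is_ip = issue.get("status") == "in_progress"
--         if is_ip and first_any_ip is None:
--             first_any_ip = issue
--         if issue.get("originKind") == "routine_execution":
--             if first_routine is None:
--                 first_routine = issue
--             if is_ip and first_routine_ip is None: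
--                 first_routine_ip = issue
--     if first_routine is not None:
--         chosen = first_routine_ip if first_routine_ip is not None else first_routine
--     elif first_any is not None:
--         chosen = first_any_ip if first_any_ip is not None else first_any
--     else:
--         return None
--     return chosen.get("title", "").strip().lower()
-- ===== Notes on version B (the rewrite author's own statement) =====
-- stated objective: alternative
-- what changed: Replaced A's three intermediate filtered lists (routine, in_progress, candidates) with a single pass that keeps four first-match references and selects among them afterwards; same O(n) cost, O(1) extra space.
import Mathlib
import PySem

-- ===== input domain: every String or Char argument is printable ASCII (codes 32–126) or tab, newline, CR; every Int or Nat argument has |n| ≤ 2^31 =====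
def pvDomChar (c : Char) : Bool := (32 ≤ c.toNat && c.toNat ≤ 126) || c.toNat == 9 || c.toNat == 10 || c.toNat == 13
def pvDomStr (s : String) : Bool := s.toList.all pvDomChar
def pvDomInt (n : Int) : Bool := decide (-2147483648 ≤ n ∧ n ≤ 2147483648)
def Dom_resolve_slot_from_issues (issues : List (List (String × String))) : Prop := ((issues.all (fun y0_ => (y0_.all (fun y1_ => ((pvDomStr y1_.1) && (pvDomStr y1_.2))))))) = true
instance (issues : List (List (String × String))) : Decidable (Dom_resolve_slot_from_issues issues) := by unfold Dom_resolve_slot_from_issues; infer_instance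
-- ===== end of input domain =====

-- B is a single pass keeping four first-match references instead of A's three materialised filtered lists; return values proved equal on all inputs.

-- shared primitive: Python's dict.get on the association list (first match)
def pvGet (d : List (String × String)) (k : String) : Option String :=
  PySem.Dict.get? (PySem.Dict.mk d) k

-- ===== PORT A =====
def resolve_slot_from_issues (issues : List (List (String × String))) : Option String :=
  let routine_issues := issues.filter (fun i => pvGet i "originKind" == some "routine_execution")
  let routine_issues := if routine_issues.isEmpty then issues else routine_issues
  if routine_issues.isEmpty then none
  else
    let in_progress := routine_issues.filter (fun i => pvGet i "status" == some "in_progress")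
    let candidates := if in_progress.isEmpty then routine_issues else in_progress
    match PySem.List.pyGet? candidates 0 with   -- candidates[0]; list is nonempty here
    | none => none
    | some c => some (PySem.Str.lower (PySem.Str.strip ((pvGet c "title").getD "")))

-- ===== PORT B =====
def pvStep (s : Option (List (String × String)) × Option (List (String × String)) ×
              Option (List (String × String)) × Option (List (String × String)))
    (issue : List (String × String)) :
    Option (List (String × String)) × Option (List (String × String)) ×
    Option (List (String × String)) × Option (List (String × String)) :=
  let (fr, frip, fa, faip) := s
  let fa := if fa.isNone then some issue else fa
  let is_ip := pvGet issue "status" == some "in_progress"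
  let faip := if is_ip && faip.isNone then some issue else faip
  if pvGet issue "originKind" == some "routine_execution" then
    (if fr.isNone then some issue else fr,
     if is_ip && frip.isNone then some issue else frip, fa, faip)
  else (fr, frip, fa, faip)

def resolve_slot_from_issues_alt (issues : List (List (String × String))) : Option String :=
  let (fr, frip, fa, faip) := issues.foldl pvStep (none, none, none, none)
  let chosen? :=
    match fr with
    | some r => some (frip.getD r)
    | none => match fa with
              | some x => some (faip.getD x)
              | none => none
  chosen?.map (fun c => PySem.Str.lower (PySem.Str.strip ((pvGet c "title").getD "")))

-- ===== PRECONDITION & SPEC =====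
def Spec_resolve_slot_from_issues (issues : List (List (String × String))) (out : Option String) : Prop := out = resolve_slot_from_issues_alt issues
instance (issues : List (List (String × String))) (out : Option String) : Decidable (Spec_resolve_slot_from_issues issues out) := by unfold Spec_resolve_slot_from_issues; infer_instance

-- ===== CLAIM (what is proved, stated in full; the proofs are below) =====
def Claim_equal_resolve_slot_from_issues : Prop := ∀ (issues : List (List (String × String))), Dom_resolve_slot_from_issues issues → Spec_resolve_slot_from_issues issues (resolve_slot_from_issues issues)

-- ===== LEMMAS AND PROOFS =====

def pR (i : List (String × String)) : Bool := pvGet i "originKind" == some "routine_execution"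
def pIP (i : List (String × String)) : Bool := pvGet i "status" == some "in_progress"

-- loop invariant: the fold computes heads of the four filtered lists (seeded by the incoming state)
lemma fold_inv (xs : List (List (String × String)))
    (fr frip fa faip : Option (List (String × String))) :
    xs.foldl pvStep (fr, frip, fa, faip) =
      (fr.or ((xs.filter pR).head?),
       frip.or ((xs.filter (fun i => pIP i && pR i)).head?),
       fa.or xs.head?,
       faip.or ((xs.filter pIP).head?)) := by
  induction xs generalizing fr frip fa faip with
  | nil => simp
  | cons x xs ih =>
    simp only [List.foldl_cons, pvStep]
    by_cases hR : pR x <;> by_cases hI : pIP x <;>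
      simp only [pR, pIP] at hR hI <;>
      simp [hR, hI, ih, pR, pIP] <;>
      cases fr <;> cases frip <;> cases fa <;> cases faip <;> simp

theorem resolve_slot_from_issues_spec_aux (issues : List (List (String × String))) :
    resolve_slot_from_issues issues = resolve_slot_from_issues_alt issues := by
  unfold resolve_slot_from_issues resolve_slot_from_issues_alt
  rw [fold_inv]
  simp only [Option.none_or]
  rcases hR : issues.filter pR with _ | ⟨r, rs⟩
  · -- no routine issue: fall back to all issues
    have hR' : issues.filter (fun i => pvGet i "originKind" == some "routine_execution") = [] := by
      simpa [pR] using hR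
    have hIPR : issues.filter (fun i => pIP i && pR i) = [] := by
      rw [← List.filter_filter, hR]; rfl
    obtain _ | ⟨x, xs⟩ := issues
    · simp
    · simp only [hR', List.isEmpty_nil, if_true, List.isEmpty_cons,
        Bool.false_eq_true, if_false, List.head?_nil, List.head?_cons]
      rcases hIP : (x :: xs).filter pIP with _ | ⟨p, ps⟩
      · have h2 : (x :: xs).filter (fun i => pvGet i "status" == some "in_progress") = [] := by
          simpa [pIP] using hIP
        simp [h2, PySem.List.pyGet?, PySem.List.pyIdx?]
      · have h2 : (x :: xs).filter (fun i => pvGet i "status" == some "in_progress") = p :: ps := by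
          simpa [pIP] using hIP
        simp [h2, PySem.List.pyGet?, PySem.List.pyIdx?]
  · -- routine issues found
    have hR' : issues.filter (fun i => pvGet i "originKind" == some "routine_execution") = r :: rs := by
      simpa [pR] using hR
    simp only [hR', List.isEmpty_cons, Bool.false_eq_true, if_false, List.head?_cons]
    have hcomm : (r :: rs).filter (fun i => pvGet i "status" == some "in_progress")
        = issues.filter (fun i => pIP i && pR i) := by
      rw [← hR', ← List.filter_filter]; rfl
    rcases hIP : issues.filter (fun i => pIP i && pR i) with _ | ⟨p, ps⟩ <;>
      rw [hIP] at hcomm <;>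
      simp [hcomm, PySem.List.pyGet?, PySem.List.pyIdx?]

-- ===== VERDICT (by name: the statement is the Claim_ definition above) =====
theorem resolve_slot_from_issues_spec : Claim_equal_resolve_slot_from_issues := by
  intro issues _
  exact resolve_slot_from_issues_spec_aux issues
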